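-- pv_equiv track=rewrite | github.com/bbeni/advent_of_code_2023 | py_days/prob_12_1.py | count
-- ===== SOURCE A (Python) =====
-- def count(sequence):
--     count = 0
--     coll = []
--     for x in sequence:
--         if x == '#':
--             count+=1
--         elif count != 0:
--             coll.append(count)
--             count = 0
--     if count != 0:
--         coll.append(count)
--     return coll
-- ===== SOURCE B (Python) =====
-- from itertools import groupby
--
-- def count(sequence):
--     return [sum(1 for _ in g) for k, g in groupby(sequence) if k == '#']
-- ===== Notes on version B (the rewrite author's own statement) =====
-- stated objective: idiomatic
-- what changed: Replaces the manual running-counter-with-flush loop by an itertools.groupby decomposition: group consecutive equal elements, keep the groups whose key is the marker character, measure each group's length.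
import Mathlib
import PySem

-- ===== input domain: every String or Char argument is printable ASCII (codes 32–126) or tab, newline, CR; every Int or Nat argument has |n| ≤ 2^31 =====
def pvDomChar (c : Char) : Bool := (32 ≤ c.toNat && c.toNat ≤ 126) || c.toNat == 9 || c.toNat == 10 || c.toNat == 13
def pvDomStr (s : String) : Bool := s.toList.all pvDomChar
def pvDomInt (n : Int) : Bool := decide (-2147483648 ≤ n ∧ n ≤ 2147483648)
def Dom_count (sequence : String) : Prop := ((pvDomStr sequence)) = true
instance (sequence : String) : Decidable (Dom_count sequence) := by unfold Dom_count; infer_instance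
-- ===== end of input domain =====

-- B replaces A's running-counter-with-flush loop by a group-consecutive-equal / filter '#' / measure-length decomposition (idiomatic; same cost).

-- ===== PORT A =====
-- the for-loop of A, state = (count, coll); final flush at the end of the list
def countLoop : List Char → Int → List Int → List Int
  | [], c, coll => if c ≠ 0 then coll ++ [c] else coll
  | x :: xs, c, coll =>
    if x = '#' then countLoop xs (c + 1) coll
    else if c ≠ 0 then countLoop xs 0 (coll ++ [c])
    else countLoop xs c coll

def count (sequence : String) : List Int := countLoop sequence.toList 0 []

-- ===== PORT B =====
-- itertools.groupby: each maximal run of equal chars as (key, length of group)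
def groupSpans : List Char → List (Char × Int)
  | [] => []
  | x :: xs =>
    (x, 1 + (Int.ofNat (xs.takeWhile (· = x)).length)) :: groupSpans (xs.dropWhile (· = x))
termination_by l => l.length
decreasing_by
  simpa using Nat.lt_succ_of_le (List.length_dropWhile_le (· = x) xs)

def altList (l : List Char) : List Int :=
  (groupSpans l).filterMap (fun p => if p.1 = '#' then some p.2 else none)

def count_alt (sequence : String) : List Int := altList sequence.toList

-- ===== PRECONDITION & SPEC =====
def Spec_count (sequence : String) (out : List Int) : Prop := out = count_alt sequence
instance (sequence : String) (out : List Int) : Decidable (Spec_count sequence out) := by unfold Spec_count; infer_instance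

-- ===== CLAIM (what is proved, stated in full; the proofs are below) =====
def Claim_equal_count : Prop := ∀ (sequence : String), Dom_count sequence → Spec_count sequence (count sequence)

-- ===== LEMMAS AND PROOFS =====

lemma altList_nil : altList [] = [] := by simp [altList, groupSpans]

lemma altList_cons (x : Char) (xs : List Char) :
    altList (x :: xs) =
      (if x = '#' then [((1 : Int) + Int.ofNat (xs.takeWhile (· = x)).length)] else [])
        ++ altList (xs.dropWhile (· = x)) := by
  rw [altList, groupSpans]
  split_ifs with h <;> simp [altList, h]

-- skipping one non-'#' char does not change B's result
lemma altList_skip (y : Char) (ys : List Char) (hy : y ≠ '#') :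
    altList (y :: ys) = altList ys := by
  rw [altList_cons, if_neg hy]
  cases ys with
  | nil => simp
  | cons z zs =>
    by_cases hz : z = y
    · subst hz
      rw [List.dropWhile_cons, if_pos (by simp)]
      rw [altList_cons, if_neg hy]
    · rw [List.dropWhile_cons, if_neg (by simp [hz])]
      simp

lemma head_dropWhile_ne (p : Char → Bool) :
    ∀ (l : List Char) (y : Char) (ys : List Char), l.dropWhile p = y :: ys → p y = false := by
  intro l
  induction l with
  | nil => intro y ys h; simp [List.dropWhile] at h
  | cons a as ih =>
    intro y ys h
    rw [List.dropWhile_cons] at h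
    split_ifs at h with ha
    · exact ih y ys h
    · cases h; simpa using ha

-- consuming a run of '#'s just adds its length to the counter
lemma countLoop_run :
    ∀ (xs : List Char) (c : Int) (coll : List Int), 0 < c →
      countLoop xs c coll
        = countLoop (xs.dropWhile (· = '#')) (c + Int.ofNat (xs.takeWhile (· = '#')).length) coll := by
  intro xs
  induction xs with
  | nil => intro c coll _; simp
  | cons x xs ih =>
    intro c coll hc
    by_cases hx : x = '#'
    · subst hx
      rw [countLoop, if_pos rfl, List.dropWhile_cons, if_pos (by simp),
          List.takeWhile_cons, if_pos (by simp)]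
      rw [ih (c + 1) coll (by omega)]
      congr 1
      simp only [List.length_cons, Int.ofNat_eq_natCast]
      push_cast
      ring
    · rw [List.dropWhile_cons, if_neg (by simp [hx]), List.takeWhile_cons,
          if_neg (by simp [hx])]
      simp

lemma countLoop_zero :
    ∀ (n : Nat) (xs : List Char), xs.length ≤ n → ∀ (coll : List Int),
      countLoop xs 0 coll = coll ++ altList xs := by
  intro n
  induction n with
  | zero =>
    intro xs hxs coll
    have : xs = [] := List.eq_nil_of_length_eq_zero (Nat.le_zero.mp hxs)
    subst this
    simp [countLoop, altList_nil]
  | succ n ih =>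
    intro xs hxs coll
    cases xs with
    | nil => simp [countLoop, altList_nil]
    | cons x xs =>
      simp only [List.length_cons, Nat.succ_le_succ_iff] at hxs
      by_cases hx : x = '#'
      · subst hx
        rw [countLoop, if_pos rfl, show (0 : Int) + 1 = 1 from by norm_num]
        rw [countLoop_run xs 1 coll (by norm_num)]
        set k : Int := 1 + Int.ofNat (xs.takeWhile (· = '#')).length with hk
        have hkpos : k ≠ 0 := by simp only [hk, Int.ofNat_eq_natCast]; omega
        rw [altList_cons, if_pos rfl, ← hk]
        cases hd : xs.dropWhile (· = '#') with
        | nil => rw [countLoop, if_pos hkpos]; simp [altList_nil]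
        | cons y ys =>
          have hy : y ≠ '#' := by
            have := head_dropWhile_ne (· = '#') xs y ys hd
            simpa using this
          rw [countLoop, if_neg (by simp [hy]), if_pos hkpos]
          have hys : ys.length ≤ n := by
            have h1 : (xs.dropWhile (· = '#')).length ≤ xs.length :=
              List.length_dropWhile_le _ _
            rw [hd] at h1
            simp at h1
            omega
          rw [ih ys hys (coll ++ [k]), altList_skip y ys hy]
          simp
      · rw [countLoop, if_neg hx]
        simp only [ne_eq, not_true_eq_false, if_false]
        rw [ih xs hxs coll, altList_skip x xs hx]

-- ===== VERDICT (by name: the statement is the Claim_ definition above) =====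
theorem count_spec : Claim_equal_count := by
  intro s _
  show count s = count_alt s
  rw [count, count_alt, countLoop_zero s.toList.length s.toList le_rfl []]
  simp
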